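-- pv_equiv track=rewrite | github.com/sockki/algorithm-study | 구현/숫자_카드_나누기.py | getMaxA
-- ===== SOURCE A (Python) =====
-- def getMaxA(divisions,arr1,arr2):
--     while divisions:
--         right = True
--         now = divisions.pop()
--         for i in arr1:
--             if int(i % now) != 0:
--                 right = False
--                 break
--         if not right:
--             continue
--
--         for i in arr2:
--             if int(i % now) == 0:
--                 right = False
--                 break
--         if not right:
--             continue
--         else:
--             return now
--
--     return 0
-- ===== SOURCE B (Python) =====
-- from math import gcd
-- from functools import reduce
--
-- def getMaxA(divisions, arr1, arr2):
--     # gcd of arr1 once: a candidate divides every element of arr1 iff it divides g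
--     g = reduce(gcd, arr1, 0)
--     for now in reversed(divisions):
--         if g % now == 0 and not any(i % now == 0 for i in arr2):
--             return now
--     return 0
-- ===== Notes on version B (the rewrite author's own statement) =====
-- stated objective: faster
-- what changed: B precomputes gcd(arr1) once so the per-candidate scan of arr1 collapses to one modulo test (g % now == 0), and iterates over reversed(divisions) without mutating it instead of popping.
-- outside the precondition, e.g. on getMaxA([0, 2], [4], [3]): A returns 2, B returns 2
import Mathlib
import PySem

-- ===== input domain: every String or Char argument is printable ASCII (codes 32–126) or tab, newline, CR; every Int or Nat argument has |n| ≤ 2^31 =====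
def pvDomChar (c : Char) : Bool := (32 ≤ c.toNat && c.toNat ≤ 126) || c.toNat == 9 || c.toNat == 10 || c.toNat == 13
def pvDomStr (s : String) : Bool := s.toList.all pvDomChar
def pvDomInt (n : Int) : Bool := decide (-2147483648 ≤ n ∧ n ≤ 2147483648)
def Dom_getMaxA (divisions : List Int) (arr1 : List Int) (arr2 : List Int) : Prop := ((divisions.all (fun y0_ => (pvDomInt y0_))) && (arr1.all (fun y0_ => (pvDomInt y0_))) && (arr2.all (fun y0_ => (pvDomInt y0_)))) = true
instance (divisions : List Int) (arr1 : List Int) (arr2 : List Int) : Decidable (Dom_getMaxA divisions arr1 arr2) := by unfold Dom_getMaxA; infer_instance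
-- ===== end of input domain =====

-- B replaces A's per-candidate scan of arr1 by a single precomputed gcd test (faster, asymptotic);
-- A mutates divisions (pops it empty); B does not — the equivalence proved here is about the return value only.

-- ===== PORT A =====
-- the 'for i in arr1' loop with the 'right' flag and break: returns false at the first i with i % now != 0
def pvAScan1 (arr1 : List Int) (now : Int) : Bool :=
  match arr1 with
  | [] => true
  | i :: rest => if PySem.Int.mod i now ≠ 0 then false else pvAScan1 rest now

-- the 'for i in arr2' loop with break: returns false at the first i with i % now == 0
def pvAScan2 (arr2 : List Int) (now : Int) : Bool :=
  match arr2 with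
  | [] => true
  | i :: rest => if PySem.Int.mod i now = 0 then false else pvAScan2 rest now

-- the 'while divisions' loop; divisions.pop() takes from the END, so we loop over the reversed list
def pvALoop (popped : List Int) (arr1 : List Int) (arr2 : List Int) : Int :=
  match popped with
  | [] => 0
  | now :: rest =>
    if ¬ pvAScan1 arr1 now then pvALoop rest arr1 arr2
    else if ¬ pvAScan2 arr2 now then pvALoop rest arr1 arr2
    else now

def getMaxA (divisions : List Int) (arr1 : List Int) (arr2 : List Int) : Int :=
  pvALoop divisions.reverse arr1 arr2

-- ===== PORT B =====
-- g = reduce(gcd, arr1, 0)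
def pvBGcd (arr1 : List Int) : Int :=
  arr1.foldl (fun a i => (Int.gcd a i : Int)) 0

-- for now in reversed(divisions): if g % now == 0 and not any(i % now == 0 for i in arr2): return now
def pvBLoop (rev : List Int) (g : Int) (arr2 : List Int) : Int :=
  match rev with
  | [] => 0
  | now :: rest =>
    if PySem.Int.mod g now = 0 ∧ ¬ arr2.any (fun i => PySem.Int.mod i now == 0) then now
    else pvBLoop rest g arr2

def getMaxA_alt (divisions : List Int) (arr1 : List Int) (arr2 : List Int) : Int :=
  pvBLoop divisions.reverse (pvBGcd arr1) arr2

-- ===== PRECONDITION & SPEC =====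
-- Pre_ excludes divisor lists containing 0: there Python's '% 0' raises ZeroDivisionError in A or B
-- unless an earlier candidate (or A's empty-arr scans) short-circuits first — an accident of scan order.
def Pre_getMaxA (divisions : List Int) (arr1 : List Int) (arr2 : List Int) : Prop :=
  (0 : Int) ∉ divisions
instance (divisions : List Int) (arr1 : List Int) (arr2 : List Int) : Decidable (Pre_getMaxA divisions arr1 arr2) := by unfold Pre_getMaxA; infer_instance

def pvWitness_getMaxA : List Int × List Int × List Int := ([3, 2], [4, 6], [5])

def Spec_getMaxA (divisions : List Int) (arr1 : List Int) (arr2 : List Int) (out : Int) : Prop := out = getMaxA_alt divisions arr1 arr2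
instance (divisions : List Int) (arr1 : List Int) (arr2 : List Int) (out : Int) : Decidable (Spec_getMaxA divisions arr1 arr2 out) := by unfold Spec_getMaxA; infer_instance

-- ===== CLAIM (what is proved, stated in full; the proofs are below) =====
def Claim_equal_getMaxA : Prop := ∀ (divisions : List Int) (arr1 : List Int) (arr2 : List Int), Dom_getMaxA divisions arr1 arr2 → Pre_getMaxA divisions arr1 arr2 → Spec_getMaxA divisions arr1 arr2 (getMaxA divisions arr1 arr2)

-- ===== LEMMAS AND PROOFS =====

theorem dvd_gcd_iff_int (now a b : Int) : now ∣ (Int.gcd a b : Int) ↔ now ∣ a ∧ now ∣ b := by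
  rw [← Int.natAbs_dvd_natAbs, ← Int.natAbs_dvd_natAbs (a := now) (b := a),
      ← Int.natAbs_dvd_natAbs (a := now) (b := b)]
  simp only [Int.gcd, Int.natAbs_natCast]
  exact Nat.dvd_gcd_iff

theorem dvd_pvBGcd_iff (now : Int) (arr1 : List Int) :
    now ∣ pvBGcd arr1 ↔ ∀ i ∈ arr1, now ∣ i := by
  unfold pvBGcd
  suffices h : ∀ (a : Int), now ∣ arr1.foldl (fun a i => (Int.gcd a i : Int)) a ↔ now ∣ a ∧ ∀ i ∈ arr1, now ∣ i by
    simpa using h 0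
  induction arr1 with
  | nil => simp
  | cons i rest ih =>
    intro a
    simp only [List.foldl_cons, ih, dvd_gcd_iff_int, List.mem_cons]
    constructor
    · rintro ⟨⟨ha, hi⟩, hr⟩
      exact ⟨ha, fun j hj => hj.elim (fun e => e ▸ hi) (hr j)⟩
    · rintro ⟨ha, hall⟩
      exact ⟨⟨ha, hall i (Or.inl rfl)⟩, fun j hj => hall j (Or.inr hj)⟩

theorem pvAScan1_iff (arr1 : List Int) (now : Int) :
    pvAScan1 arr1 now = true ↔ ∀ i ∈ arr1, now ∣ i := by
  induction arr1 with
  | nil => simp [pvAScan1]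
  | cons i rest ih =>
    simp only [pvAScan1, List.mem_cons]
    by_cases h : PySem.Int.mod i now = 0
    · have hd : now ∣ i := (PySem.Int.mod_eq_zero_iff_dvd i now).mp h
      rw [if_neg (not_not_intro h), ih]
      constructor
      · intro hall j hj
        exact hj.elim (fun e => e ▸ hd) (hall j)
      · intro hall j hj
        exact hall j (Or.inr hj)
    · have hd : ¬ now ∣ i := fun hdvd => h ((PySem.Int.mod_eq_zero_iff_dvd i now).mpr hdvd)
      rw [if_pos h]
      constructor
      · intro hfalse; exact absurd hfalse (by simp)
      · intro hall; exact absurd (hall i (Or.inl rfl)) hd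

theorem pvAScan1_eq_gcd_test (arr1 : List Int) (now : Int) :
    (pvAScan1 arr1 now = true) ↔ PySem.Int.mod (pvBGcd arr1) now = 0 := by
  rw [pvAScan1_iff, PySem.Int.mod_eq_zero_iff_dvd, dvd_pvBGcd_iff]

theorem pvAScan2_eq_not_any (arr2 : List Int) (now : Int) :
    pvAScan2 arr2 now = ! arr2.any (fun i => PySem.Int.mod i now == 0) := by
  induction arr2 with
  | nil => rfl
  | cons i rest ih =>
    simp only [pvAScan2, List.any_cons]
    by_cases h : PySem.Int.mod i now = 0 <;> simp [h, ih]

theorem pvLoop_eq (popped : List Int) (arr1 arr2 : List Int) :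
    pvALoop popped arr1 arr2 = pvBLoop popped (pvBGcd arr1) arr2 := by
  induction popped with
  | nil => rfl
  | cons now rest ih =>
    simp only [pvALoop, pvBLoop]
    have hA2 := pvAScan2_eq_not_any arr2 now
    by_cases h1 : pvAScan1 arr1 now = true
    · have hg : PySem.Int.mod (pvBGcd arr1) now = 0 := (pvAScan1_eq_gcd_test arr1 now).mp h1
      by_cases hany : arr2.any (fun i => PySem.Int.mod i now == 0) = true
      · have h2 : pvAScan2 arr2 now = false := by rw [hA2, hany]; rfl
        simp [h1, h2, hg, hany, ih]
      · have h2 : pvAScan2 arr2 now = true := by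
          rw [hA2]
          simp [Bool.not_eq_true _ ▸ hany]
        simp [h1, h2, hg, hany]
    · have hg : ¬ PySem.Int.mod (pvBGcd arr1) now = 0 := fun hc =>
        h1 ((pvAScan1_eq_gcd_test arr1 now).mpr hc)
      simp [h1, hg, ih]

-- ===== VERDICT (by name: the statement is the Claim_ definition above) =====
theorem getMaxA_spec : Claim_equal_getMaxA := by
  intro divisions arr1 arr2 _ _
  unfold Spec_getMaxA getMaxA getMaxA_alt
  exact pvLoop_eq divisions.reverse arr1 arr2
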